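/- GENERATED by tools/from_farm_form.py from prooffarm-gif/accepted/DGifGetImageDesc.4/Lemmas.lean (a worked proof of the farm's unit `DGifGetImageDesc.4`,
   accepted by the verdict) — do not edit. -/
import Gif.Spec.Units.DGifGetImageDesc_4
import Gif.Spec.AllSegs

/-!
  Lemmas for the unit `DGifGetImageDesc.4` (0x109503 … 0x109535, 12 instructions; dgif_lib.c:461-462):
  `sp = &GifFile->SavedImages[GifFile->ImageCount]`, `memcpy(&sp->ImageDesc, &GifFile->Image, sizeof(GifImageDesc))`.

  Part 1 (pure, no machine steps):
      d4_slot_addr, d4_slot_word   `arr + (n · 8 − n) · 8 = arr + 56 · n` on words (the walker's rewrite rule for `rbp`)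
      d4_far_gif, d4_far_pv        the SavedImages array is neither gif nor pv: 64 bytes apart [FO2]
      d4_after                     what the copy into the UNCOUNTED slot keeps (`HeapInv`, `GifOK`, `rem`, `LZOK`) and gives (the
                                   slot's `ImageDesc.ColorMap` is `gif.Image.ColorMap`)
  Part 2 (the walk):
      d4_walk                      `Grown` at 0x109503 → `AfterCopy` at 0x109535: the checked load of `ImageCount`, the call of
                                   `memcpy`, the exit assertion
-/

open X86 X86.User Asan ProgX.Base ProgX.Base.Spec Gif.Spec

namespace Gif.Spec.DGifGetImageDesc_4

/-! ### Part 1: pure facts -/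

/-- `&SavedImages[n]` as gcc computes it (`lea rax, [rdx*8] ; sub rax, rdx ; lea rbp, [rbp + rax*8]`), as a number. -/
theorem d4_slot_addr (a n : Nat) (h : a + 56 * n < 2 ^ 64) :
    (UInt64.ofNat a + (UInt64.ofNat n * 8 - UInt64.ofNat n) * 8).toNat = a + 56 * n := by
  rw [UInt64.toNat_add, UInt64.toNat_mul, UInt64.toNat_sub, UInt64.toNat_mul, UInt64.toNat_ofNat', UInt64.toNat_ofNat']
  have e8 : (8 : UInt64).toNat = 8 := by decide
  rw [e8]
  omega

/-- The same as an equation of words: the walker's rewrite rule for `rbp` at 10951FH. -/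
theorem d4_slot_word (a n : Nat) (h : a + 56 * n < 2 ^ 64) :
    UInt64.ofNat a + (UInt64.ofNat n * 8 - UInt64.ofNat n) * 8 = UInt64.ofNat (a + 56 * n) := by
  apply UInt64.toNat_inj.mp
  rw [d4_slot_addr a n h, UInt64.toNat_ofNat']
  omega

/-- **The SavedImages array and gif are two different objects of the forest, at least 64 bytes apart** [FO2] (`Owns.far`;
`56 · cap = 120` has no solution). -/
theorem d4_far_gif {H : Heap} {F : Forest} {R : Rd} {mem : Mem} {s : Saved} (hok : GifOK H F R mem) (hheap : HeapOK H mem)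
    (hsaved : F.saved = some s) :
    F.gif + 120 + 64 ≤ s.arr ∨ s.arr + 56 * s.cap + 64 ≤ F.gif := by
  have hown : (s.arr, 56 * s.cap) ∈ F.owned := by
    apply Forest.mem_owned_saved
    rw [hsaved]
    exact List.mem_cons_self
  have hne : ((F.gif, 120) : Nat × Nat) ≠ (s.arr, 56 * s.cap) := by
    intro h
    have h2 := congrArg Prod.snd h
    simp only at h2
    omega
  exact hok.owns.far hheap (a := (F.gif, 120)) (b := (s.arr, 56 * s.cap)) List.mem_cons_self hown hne

/-- **The SavedImages array and pv are two different objects of the forest** (`56 · cap = 24936` has no solution). -/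
theorem d4_far_pv {H : Heap} {F : Forest} {R : Rd} {mem : Mem} {s : Saved} (hok : GifOK H F R mem) (hheap : HeapOK H mem)
    (hsaved : F.saved = some s) :
    F.pv + 24936 + 64 ≤ s.arr ∨ s.arr + 56 * s.cap + 64 ≤ F.pv := by
  have hown : (s.arr, 56 * s.cap) ∈ F.owned := by
    apply Forest.mem_owned_saved
    rw [hsaved]
    exact List.mem_cons_self
  have hne : ((F.pv, 24936) : Nat × Nat) ≠ (s.arr, 56 * s.cap) := by
    intro h
    have h2 := congrArg Prod.snd h
    simp only at h2
    omega
  exact hok.owns.far hheap (a := (F.pv, 24936)) (b := (s.arr, 56 * s.cap))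
    (List.mem_cons_of_mem _ List.mem_cons_self) hown hne

/-- **WHAT `memcpy(sp, &gif->Image, 32)` KEEPS AND GIVES** (dgif_lib.c:462), as a fact about two memories: `mem` at the cut 109503H,
`mem'` behind the call. The footprint is stack below `top` (the pushed return addresses and memcpy's frame) and the 32 bytes at
`sp = arr + 56 · length`, the head of the UNCOUNTED slot: a loose `tail` window of the array inside a live object. The heap's
invariant, the state invariant, the reader's measure and the LZW ranges are kept; the slot's `ImageDesc.ColorMap` (bytes 24 … 32 of
the copy) is what `gif.Image.ColorMap` (gif + 64, not written) holds. -/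
theorem d4_after {H : Heap} {rest : List Obj} {frames : List (Nat × FrameLayout)} {F : Forest} {R : Rd} {top : Nat}
    {mem mem' : Mem} {s : Saved} {pv : Nat}
    (hinv : HeapInv H rest frames top mem) (hok : GifOK H F R mem) (hbase : H.base = 0x800000)
    (hcur : 0x700000 ≤ R.cur ∧ R.cur + 16 ≤ 0x800000) (hsaved : F.saved = some s) (hroom : s.imgs.length + 1 ≤ s.cap)
    (hun : ShadowUntouched mem mem') (htop1 : 0x700000 + 88 ≤ top) (htop2 : top ≤ R.cur)
    (hs : Mem.SameExcept [⟨top - 88, top⟩, ⟨s.arr + 56 * s.imgs.length, s.arr + 56 * s.imgs.length + 32⟩] mem mem')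
    (hcopy : ∀ i, i < 32 → rd mem' (s.arr + 56 * s.imgs.length + i) 1 = rd mem (F.gif + 40 + i) 1)
    (hpv : F.pv = pv) (hlz : LZOK mem pv) :
    HeapInv H rest frames top mem' ∧ GifOK H F R mem' ∧ rem R mem' = rem R mem ∧ LZOK mem' pv ∧
      SavedImage.ImageDesc.ColorMap mem' (s.arr + 56 * s.imgs.length) = GifFileType.Image.ColorMap mem' F.gif := by
  have hheap := hinv.heap
  have hown : (s.arr, 56 * s.cap) ∈ F.owned := by
    apply Forest.mem_owned_saved
    rw [hsaved]
    exact List.mem_cons_self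
  have hain := (hok.owns.inside hheap hown).2.2.2.2
  have hain1 := (hok.owns.inside hheap hown).1
  have hgin := (hok.owns.inside hheap (o := (F.gif, 120)) List.mem_cons_self).1
  have hpin := (hok.owns.inside hheap (o := (F.pv, 24936)) (List.mem_cons_of_mem _ List.mem_cons_self)).1
  have hgin2 := (hok.owns.inside hheap (o := (F.gif, 120)) List.mem_cons_self).2.2.2.2
  have hpin2 := (hok.owns.inside hheap (o := (F.pv, 24936)) (List.mem_cons_of_mem _ List.mem_cons_self)).2.2.2.2
  simp only at hain hain1 hgin hpin hgin2 hpin2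
  rw [hbase] at hain1 hgin hpin
  have hfg := d4_far_gif hok hheap hsaved
  have hfp := d4_far_pv hok hheap hsaved
  rw [hpv] at hfp hpin hpin2
  have hlive : H.Live s.arr (56 * s.cap) := hok.owns.live _ hown
  refine ⟨?_, ?_, ?_, ?_, ?_⟩
  · -- the heap's invariant: stack, and bytes of the live array
    exact hinv.sameExcept_stack_live hbase hun (by omega) hlive (by omega) (by omega) hs
  · -- the state invariant: both windows are loose
    apply hok.sameExcept hheap hcur hs
    intro w hw
    rcases List.mem_cons.mp hw with rfl | hw
    · exact Loose.stack hheap (by simp only; omega) (by simp only; omega) (by simp only; omega)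
    · have e : w = ⟨s.arr + 56 * s.imgs.length, s.arr + 56 * s.imgs.length + 32⟩ := List.mem_singleton.mp hw
      subst e
      exact (Loose.savedTail hheap hok.owns hsaved (Nat.le_refl _) (by simp only; omega)).1
  · -- the reader: both windows miss the cursor
    apply rem_sameExcept hs (by omega)
    intro w hw
    rcases List.mem_cons.mp hw with rfl | hw
    · left
      simp only
      omega
    · have e : w = ⟨s.arr + 56 * s.imgs.length, s.arr + 56 * s.imgs.length + 32⟩ := List.mem_singleton.mp hw
      subst e
      right
      simp only
      omega
  · -- the LZW ranges: both windows miss pv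
    apply hlz.sameExcept hs (by omega)
    intro w hw
    rcases List.mem_cons.mp hw with rfl | hw
    · left
      simp only
      omega
    · have e : w = ⟨s.arr + 56 * s.imgs.length, s.arr + 56 * s.imgs.length + 32⟩ := List.mem_singleton.mp hw
      subst e
      simp only
      omega
  · -- the copied pointer field
    simp only [gfield]
    have h1 : rd mem' (s.arr + 56 * s.imgs.length + 24) 8 = rd mem (F.gif + 64) 8 := by
      apply rd_of_bytes mem mem' _ _ 8 (by omega) (by omega)
      intro i hi
      have hc := hcopy (24 + i) (by omega)
      have e1 : s.arr + 56 * s.imgs.length + (24 + i) = s.arr + 56 * s.imgs.length + 24 + i := by omega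
      have e2 : F.gif + 40 + (24 + i) = F.gif + 64 + i := by omega
      rw [e1, e2] at hc
      exact hc
    have h2 : rd mem' (F.gif + 64) 8 = rd mem (F.gif + 64) 8 := by
      apply hs.rd _ _ (by omega)
      intro w hw
      rcases List.mem_cons.mp hw with rfl | hw
      · right
        simp only
        omega
      · have e : w = ⟨s.arr + 56 * s.imgs.length, s.arr + 56 * s.imgs.length + 32⟩ := List.mem_singleton.mp hw
        subst e
        simp only
        omega
    rw [h1, h2]

/-! ### Part 2: the walk -/

set_option maxRecDepth 4000 in
set_option maxHeartbeats 4000000 in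
/-- **109503H … the call of memcpy … 109535H (ret10)** (dgif_lib.c:461-462). `rbp = gif.SavedImages = s.arr` (`Shape.saved`), the
checked 4-byte load of `gif.ImageCount = length` (inside gif), `rbp = arr + 56 · length` (`d4_slot_word`),
`memcpy(rbp, gif + 40, 32)`: the source inside gif, the destination inside the array (`length + 1 ≤ cap`), two objects of the forest
64 bytes apart (`d4_far_gif`). Behind the call `d4_after` gives the invariants and the copied pointer field. -/
theorem d4_walk (Lay : Layout) (hLay : Lay.hi = 0x1000000) (μ : Microarch) (hμ : UserX.MicroOK μ) (u₀ : State)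
    (hcode : HasCodeNat Lay u₀ Gif.L.DGifGetImageDesc.entry Gif.Code.code_DGifGetImageDesc.nat Gif.L.DGifGetImageDesc.size)
    (h_load4 : Asan.SmallCheck Lay μ ProgX.Base.WayInv (ProgX.Base.CodeOK u₀) [.rax, .rcx, .rdx] 4
      ProgX.Base.L.__asan_load4_noabort.entry)
    (H : Heap) (rest : List Obj) (frames : List (Nat × FrameLayout)) (F : Forest) (R : Rd) (e : State) (ret : Word)
    (Hc : Heap) (Fc : Forest)
    (hcpy : Calls Lay μ ProgX.Base.WayInv (ProgX.Base.conv u₀) ProgX.Base.L.memcpy.entry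
      (ProgX.Base.Spec.memcpy.spec (Hc.liveObjs ++ rest) frames))
    (v : State) (hat : DGifGetImageDesc.Grown H rest frames F R Hc Fc u₀ e ret v) :
    ReachVia Lay μ ProgX.Base.WayInv v (DGifGetImageDesc.AfterCopy H rest frames F R Hc Fc u₀ e ret) := by
  -- THE PRELUDE: the entry assertion `Grown` = `Mid` (= `At` + the counted images + `LZOK`) + the array with room
  obtain ⟨hmid, s, hsaved, hroom⟩ := hat
  obtain ⟨hA, himgs, hlz⟩ := hmid
  have he := hA.entry
  v_entry he
  obtain ⟨henv, hrdi⟩ := hA.pre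
  obtain ⟨fgif, fpv, fscm, fpend⟩ := hA.forest
  -- what the walker reads of a segment's entry state: rip, rsp and rbx (as `c_…`), the registers kept, the text, DF / MXCSR
  have w_rip := hA.rip
  have c_rsp : v.reg .rsp = e.reg .rsp - 40 := hA.rsp
  have c_rbx : v.reg .rbx = e.reg .rdi := hA.rbx
  have w_kept : RegsKept [.rsp] v v := RegsKept.refl _ _
  have w_eq : Mem.EqOn ProgX.Base.L.textLo ProgX.Base.L.textHi u₀.mem v.mem := ProgX.Base.conv_code_eqOn hA.code
  have hdf := (show abiInv _ from hA.abi).1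
  have hmx := (show abiInv _ from hA.abi).2
  have hsse := ProgX.Base.sseOK_of_abiInv hA.abi
  -- the invariants of the PRESENT heap and forest; where the cursor and gif are, as numbers
  have hok := hA.ok
  have hinv := hA.inv
  have hbase : Hc.base = 0x800000 := by
    rw [hA.region.1]
    exact henv.heap.base
  have hcur := henv.ctx.cursor_range henv.heap.inv.shadow
  have hgin := hok.owns.inside hinv.heap (o := (Fc.gif, 120)) List.mem_cons_self
  simp only at hgin
  rw [hbase, fgif] at hgin
  have hgin1 := hgin.1
  have hgin2 := hgin.2.2.2.2
  clear hgin
  -- the array: its fields in gif, where it is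
  have hsv := hok.shape.saved
  rw [hsaved] at hsv
  obtain ⟨hsv1, hsv2, hsv3, hsv4, hsv5⟩ : GifFileType.SavedImages v.mem Fc.gif = s.arr ∧
      GifFileType.ImageCount v.mem Fc.gif = s.imgs.length ∧ s.imgs.length ≤ s.cap ∧ 1 ≤ s.cap ∧
      ∀ k (h : k < s.imgs.length), ImgAt (s.arr + 56 * k) s.imgs[k] v.mem := hsv
  have hown : (s.arr, 56 * s.cap) ∈ Fc.owned := by
    apply Forest.mem_owned_saved
    rw [hsaved]
    exact List.mem_cons_self
  have hain := hok.owns.inside hinv.heap hown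
  simp only at hain
  rw [hbase] at hain
  have hain1 := hain.1
  have hain2 := hain.2.2.2.2
  clear hain
  -- the two loads of the segment, as facts about `v.mem` in the walker's form (`rbx = gif` is the entry's `rdi`)
  simp only [gfield] at hsv1 hsv2
  rw [fgif] at hsv1 hsv2
  have l_saved : v.mem.readLE (e.reg .rdi + 0x48) 8 = s.arr := by
    rw [rd_eq_readLE v.mem _ (F.gif + 72) 8 (by u_omega)]
    exact hsv1
  have l_count : v.mem.readLE (e.reg .rdi + 0x20) 4 = s.imgs.length := by
    rw [rd_eq_readLE v.mem _ (F.gif + 32) 4 (by u_omega)]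
    exact hsv2
  -- the slots and the footprint that `At` at the exit states again
  have k_r13 : v.mem.readLE (e.reg .rsp - 8) 8 = (e.reg .r13).toNat := hA.slot_r13
  have k_r12 : v.mem.readLE (e.reg .rsp - 16) 8 = (e.reg .r12).toNat := hA.slot_r12
  have k_rbp : v.mem.readLE (e.reg .rsp - 24) 8 = (e.reg .rbp).toNat := hA.slot_rbp
  have k_rbx : v.mem.readLE (e.reg .rsp - 32) 8 = (e.reg .rbx).toNat := hA.slot_rbx
  have k_ra : UInt64.ofNat (v.mem.readLE (e.reg .rsp) 8) = ret := hA.slot_ra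
  have hsame : Mem.SameExcept
    [⟨(e.reg .rsp).toNat - 496, (e.reg .rsp).toNat⟩,
     ⟨0x800000, 0x1000020⟩,
     ⟨R.cur, R.cur + 8⟩] e.mem v.mem := hA.same
  -- `ImageCount` is a small `int` (the array fits the heap's region), `&SavedImages[ImageCount]` does not wrap
  have hlen : s.imgs.length < 2 ^ 31 := by omega
  have hnw : s.arr + 56 * s.imgs.length < 2 ^ 64 := by omega
  -- THE WALK, from 0x109503 (dgif_lib.c:461) to the return address of memcpy 0x109535 (ret10 = at_109535, dgif_lib.c:463)
  u_walk hcode [hμ.vendor, cnt32_sext_bv _ hlen, d4_slot_word s.arr s.imgs.length hnw]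
    until [Gif.L.DGifGetImageDesc.ret10] span [ProgX.Base.L.textLo, ProgX.Base.L.textHi] side (v_side)
  case check_10950b =>
    -- 0x10950b, dgif_lib.c:461 the load of `gif.ImageCount`: 4 bytes at gif + 32, inside gif
    have hun : ShadowUntouched v.mem s_10950b.mem := by v_untouched
    have hgl : LiveIn (Hc.liveObjs ++ rest) frames F.gif 120 := by
      rw [← fgif]
      exact hok.gif_live.liveIn rest frames (Nat.le_refl _) (Nat.le_refl _)
    exact hgl.accSmall hinv.shadow hun _ 4 (by decide) (by u_omega) (by u_omega)
  case call_inv =>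
    v_inv
  case pre_109530 =>
    -- MEMCPY'S PRECONDITION (dgif_lib.c:462). Only return addresses were pushed since `v`: the heap's invariant at memcpy's entry
    obtain ⟨hinvA, hokA, hremA⟩ := store_stack hinv hok ⟨hcur.1, hcur.2.1⟩ (e.reg .rsp - 48) 8 1086773
      (by u_omega) (by u_omega)
    rw [← w_mem] at hinvA hokA
    have e_top : (s_109530.reg .rsp).toNat + 8 = (e.reg .rsp).toNat - 40 := by
      rw [w_rsp]
      u_omega
    rw [← e_top] at hinvA
    have hpreA : HeapPre Hc rest frames s_109530 := SameRegion.heapPre hA.region henv.heap hinvA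
    have hfar := d4_far_gif hok hinv.heap hsaved
    rw [fgif] at hfar
    have e32 : (Word.ofBV 32#32).toNat = 32 := by decide
    refine ⟨hpreA.shadowPre, Or.inr ⟨?_, ?_, ?_⟩⟩
    · -- the source: 32 bytes at gif + 40, inside gif
      rw [w_rsi, w_rdx, e32]
      apply hok.owns.liveIn (o := (Fc.gif, 120)) List.mem_cons_self rest frames
      · rw [fgif]
        u_omega
      · rw [fgif]
        u_omega
    · -- the destination: the head of the uncounted slot, inside the array
      rw [w_rdi, w_rdx, e32]
      apply hok.owns.liveIn hown rest frames
      · u_omega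
      · u_omega
    · -- two different objects of the forest
      rw [w_rdi, w_rsi, w_rdx, e32]
      u_omega
  -- 0x109535 (ret10): MEMCPY HAS RETURNED. Its post: the 32 bytes copied, no shadow byte written
  obtain ⟨hrax, hunc, hcopy⟩ : s_109530r.reg .rax = s_109530.reg .rdi ∧ ShadowUntouched s_109530.mem s_109530r.mem ∧
      ∀ i, i < (s_109530.reg .rdx).toNat →
        s_109530r.mem.readLE (s_109530.reg .rdi + UInt64.ofNat i) 1 = s_109530.mem.readLE (s_109530.reg .rsi + UInt64.ofNat i) 1 :=
    w_post
  have e32 : (Word.ofBV 32#32).toNat = 32 := by decide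
  rw [w_rdx_109530, e32, w_rdi_109530, w_rsi_109530] at hcopy
  -- the callee's footprint in terms of `v`
  v_after_call w_rsp_109530 w_mem_109530
  simp only [w_rdi_109530, w_rdx_109530, e32] at w_same
  -- THE SLOTS AND THE RETURN ADDRESS: over the pushed return address, then through memcpy's footprint
  have hp13 : s_109530.mem.readLE (e.reg .rsp - 8) 8 = (e.reg .r13).toNat := by
    rw [w_mem_109530]
    u_frame k_r13
  rw [w_mem_109530] at hp13
  have hs13 : s_109530r.mem.readLE (e.reg .rsp - 8) 8 = (e.reg .r13).toNat := by u_frame hp13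
  have hp12 : s_109530.mem.readLE (e.reg .rsp - 16) 8 = (e.reg .r12).toNat := by
    rw [w_mem_109530]
    u_frame k_r12
  rw [w_mem_109530] at hp12
  have hs12 : s_109530r.mem.readLE (e.reg .rsp - 16) 8 = (e.reg .r12).toNat := by u_frame hp12
  have hpbp : s_109530.mem.readLE (e.reg .rsp - 24) 8 = (e.reg .rbp).toNat := by
    rw [w_mem_109530]
    u_frame k_rbp
  rw [w_mem_109530] at hpbp
  have hsbp : s_109530r.mem.readLE (e.reg .rsp - 24) 8 = (e.reg .rbp).toNat := by u_frame hpbp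
  have hpbx : s_109530.mem.readLE (e.reg .rsp - 32) 8 = (e.reg .rbx).toNat := by
    rw [w_mem_109530]
    u_frame k_rbx
  rw [w_mem_109530] at hpbx
  have hsbx : s_109530r.mem.readLE (e.reg .rsp - 32) 8 = (e.reg .rbx).toNat := by u_frame hpbx
  have hpra : UInt64.ofNat (s_109530.mem.readLE (e.reg .rsp) 8) = ret := by
    rw [w_mem_109530]
    u_frame k_ra
  rw [w_mem_109530] at hpra
  have hsra : UInt64.ofNat (s_109530r.mem.readLE (e.reg .rsp) 8) = ret := by u_frame hpra
  -- the copy, as reads at numbers: byte `i` of the slot is byte `i` of `gif.Image` at the cut (the pushed return address is elsewhere)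
  have hcopyN : ∀ i, i < 32 → rd s_109530r.mem (s.arr + 56 * s.imgs.length + i) 1 = rd v.mem (Fc.gif + 40 + i) 1 := by
    intro i hi
    have hc := hcopy i hi
    rw [w_mem_109530] at hc
    have ea : (UInt64.ofNat (s.arr + 56 * s.imgs.length) + UInt64.ofNat i).toNat = s.arr + 56 * s.imgs.length + i := by
      rw [UInt64.toNat_add, UInt64.toNat_ofNat', UInt64.toNat_ofNat']
      omega
    have eb : (e.reg .rdi + 40 + UInt64.ofNat i).toNat = F.gif + 40 + i := by
      have e40 : (40 : UInt64).toNat = 40 := by decide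
      rw [UInt64.toNat_add, UInt64.toNat_add, UInt64.toNat_ofNat', e40, hrdi]
      omega
    rw [rd_eq_readLE _ _ _ 1 ea, rd_eq_readLE _ _ _ 1 eb] at hc
    rw [hc, fgif]
    apply rd_writeLE_disjoint
    · u_omega
    · omega
    · right
      u_omega
  -- the footprint since the cut: stack below the body's stack pointer, and the head of the uncounted slot
  have hsv : Mem.SameExcept
    [⟨(e.reg .rsp).toNat - 40 - 88, (e.reg .rsp).toNat - 40⟩,
     ⟨s.arr + 56 * s.imgs.length, s.arr + 56 * s.imgs.length + 32⟩] v.mem s_109530r.mem := by u_same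
  have hunv : ShadowUntouched v.mem s_109530r.mem := by v_untouched
  obtain ⟨hinv1, hok1, hrem1, hlz1, hfield⟩ := d4_after hinv hok hbase ⟨hcur.1, hcur.2.1⟩ hsaved hroom hunv
    (by omega) (by omega) hsv hcopyN fpv hlz
  -- the footprint since the entry: memcpy's windows lie inside the function's
  have hsame1 : Mem.SameExcept
    [⟨(e.reg .rsp).toNat - 496, (e.reg .rsp).toNat⟩,
     ⟨0x800000, 0x1000020⟩,
     ⟨R.cur, R.cur + 8⟩] e.mem s_109530r.mem := by u_same
  -- THE EXIT ASSERTION: `At` at 0x109535 …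
  have hA1 : DGifGetImageDesc.At Gif.L.DGifGetImageDesc.at_109535 H rest frames F R Hc Fc u₀ e ret s_109530r := {
    entry := hA.entry
    pre := hA.pre
    rip := w_rip
    rsp := w_rsp
    rbx := (w_kept.get .rbx rfl).trans c_rbx
    r14 := (w_kept.get .r14 rfl).trans hA.r14
    r15 := (w_kept.get .r15 rfl).trans hA.r15
    slot_r13 := hs13
    slot_r12 := hs12
    slot_rbp := hsbp
    slot_rbx := hsbx
    slot_ra := hsra
    inv := hinv1
    region := hA.region
    forest := hA.forest
    ok := hok1
    rem := by
      rw [hrem1]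
      exact hA.rem
    same := hsame1
    code := w_code
    abi := w_inv
  }
  -- … the counted images and the LZW ranges are kept, `sp` is in `rbp`, the copied pointer field
  refine ReachVia.done ?_
  refine ⟨⟨hA1, himgs, hlz1⟩, s, hsaved, hroom, ?_, hfield⟩
  rw [w_rbp, UInt64.toNat_ofNat']
  omega

end Gif.Spec.DGifGetImageDesc_4
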